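-- pv_equiv track=rewrite | github.com/cuc496/Analysis-of-Active-measurement | pathHandler.py | getPlbyPathIndex
-- ===== SOURCE A (Python) =====
-- def getPlbyPathIndex(paths):
--     pl = {}
--     for i in range(len(paths)):
--         for e in paths[i]:
--             if e not in pl:
--                 pl[e] = []
--             if i not in pl[e]:
--                 pl[e].append(i)
--     return pl
-- ===== SOURCE B (Python) =====
-- def getPlbyPathIndex(paths):
--     # Unique edges in first-appearance order, then one membership scan
--     # over precomputed per-path sets for each edge.
--     seen = set()
--     order = []
--     for p in paths:
--         for e in p:
--             if e not in seen:
--                 seen.add(e)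
--                 order.append(e)
--     path_sets = [set(p) for p in paths]
--     return {e: [i for i in range(len(paths)) if e in path_sets[i]] for e in order}
-- ===== Notes on version B (the rewrite author's own statement) =====
-- stated objective: alternative
-- what changed: Instead of one pass appending indices into per-edge lists inside a dict, B first collects the unique edges in first-appearance order with a seen-set, precomputes one set per path, and then per edge scans the path indices once to list the containing paths.
import Mathlib
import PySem

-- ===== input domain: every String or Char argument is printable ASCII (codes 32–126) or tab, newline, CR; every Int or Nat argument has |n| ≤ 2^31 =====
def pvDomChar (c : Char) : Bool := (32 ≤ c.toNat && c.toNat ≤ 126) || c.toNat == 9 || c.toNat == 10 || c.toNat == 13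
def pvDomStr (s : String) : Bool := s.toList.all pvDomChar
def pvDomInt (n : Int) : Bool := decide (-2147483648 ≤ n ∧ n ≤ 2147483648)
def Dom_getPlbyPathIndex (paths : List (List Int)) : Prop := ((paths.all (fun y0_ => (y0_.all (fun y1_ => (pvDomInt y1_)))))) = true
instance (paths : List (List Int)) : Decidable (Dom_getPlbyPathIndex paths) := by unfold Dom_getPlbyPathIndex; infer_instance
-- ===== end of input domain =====

-- B collects the unique edges in first-appearance order and then scans all paths once per edge (alternative decomposition, not faster).


-- ===== PORT A =====
-- one edge step of A's inner loop: 'if e not in pl: pl[e] = []' then 'if i not in pl[e]: pl[e].append(i)'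
def pvStepEdgeA (i : Int) (d : PySem.Dict Int (List Int)) (e : Int) : PySem.Dict Int (List Int) :=
  let d1 := if d.contains e then d else d.insert e ([] : List Int)
  if (d1.getD e []).contains i then d1 else d1.insert e (d1.getD e [] ++ [i])

def getPlbyPathIndex (paths : List (List Int)) : List (Int × List Int) :=
  ((PySem.List.pyRange 0 (paths.length : Int) 1).foldl
    (fun d i => (PySem.List.pyGetD paths i ([] : List Int)).foldl (pvStepEdgeA i) d)
    PySem.Dict.empty).items

-- ===== PORT B =====
def getPlbyPathIndex_alt (paths : List (List Int)) : List (Int × List Int) :=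
  let so := paths.foldl
    (fun (so : PySem.Set Int × List Int) p =>
      p.foldl (fun so e => if so.1.contains e then so else (so.1.add e, so.2 ++ [e])) so)
    (PySem.Set.empty, ([] : List Int))
  let pathSets := paths.map (fun p => PySem.Set.ofList p)
  so.2.map (fun e => (e,
    (PySem.List.pyRange 0 (paths.length : Int) 1).filter
      (fun i => (PySem.List.pyGetD pathSets i (PySem.Set.empty : PySem.Set Int)).contains e)))

-- ===== PRECONDITION & SPEC =====
def Spec_getPlbyPathIndex (paths : List (List Int)) (out : List (Int × List Int)) : Prop := out = getPlbyPathIndex_alt paths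
instance (paths : List (List Int)) (out : List (Int × List Int)) : Decidable (Spec_getPlbyPathIndex paths out) := by unfold Spec_getPlbyPathIndex; infer_instance

-- ===== CLAIM (what is proved, stated in full; the proofs are below) =====
def Claim_equal_getPlbyPathIndex : Prop := ∀ (paths : List (List Int)), Dom_getPlbyPathIndex paths → Spec_getPlbyPathIndex paths (getPlbyPathIndex paths)

-- ===== LEMMAS AND PROOFS =====

-- value at key e after one edge step
theorem pvStepEdgeA_getD (i e e' : Int) (d : PySem.Dict Int (List Int)) :
    (pvStepEdgeA i d e').getD e [] =
      if e' = e ∧ i ∉ d.getD e [] then d.getD e [] ++ [i] else d.getD e [] := by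
  unfold pvStepEdgeA
  by_cases hc : d.contains e'
  · simp only [hc, if_true]
    by_cases he : e' = e
    · subst he
      by_cases hi : i ∈ d.getD e' []
      · simp [hi]
      · simp [hi]
    · have he2 : ¬ e = e' := fun h => he h.symm
      by_cases hi : i ∈ d.getD e' []
      · simp [hi, he]
      · simp [hi, he, he2, PySem.Dict.getD_insert]
  · simp only [hc, Bool.false_eq_true, if_false]
    have hd0 : d.getD e' [] = [] := PySem.Dict.getD_of_not_contains _ _ (by simpa using hc)
    by_cases he : e' = e
    · subst he
      simp [hd0]
    · have he2 : ¬ e = e' := fun h => he h.symm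
      simp [PySem.Dict.getD_insert, he, he2]

-- keys after one edge step evolve exactly like B's ordered-dedup step
theorem pvStepEdgeA_keys (i e : Int) (d : PySem.Dict Int (List Int)) :
    (pvStepEdgeA i d e).keys = if d.keys.contains e then d.keys else d.keys ++ [e] := by
  have hkc : d.keys.contains e = d.contains e := by
    rw [PySem.Dict.contains_eq_decide_mem_keys]
    simp
  unfold pvStepEdgeA
  by_cases hc : d.contains e
  · simp only [hkc, hc, if_true]
    split
    · rfl
    · exact PySem.Dict.keys_insert_of_contains _ _ hc
  · simp only [hkc, hc, Bool.false_eq_true, if_false]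
    have hk1 : (d.insert e ([] : List Int)).keys = d.keys ++ [e] :=
      PySem.Dict.keys_insert_of_not_contains _ _ (by simpa using hc)
    split
    · exact hk1
    · rw [PySem.Dict.keys_insert_of_contains _ _ (by simp [PySem.Dict.contains_insert_self]), hk1]

-- value at key e after A's whole inner loop over one path
theorem pvInnerA_getD (i e : Int) : ∀ (p : List Int) (d : PySem.Dict Int (List Int)),
    ((p.foldl (pvStepEdgeA i) d).getD e []) =
      if p.contains e ∧ i ∉ d.getD e [] then d.getD e [] ++ [i] else d.getD e [] := by
  intro p
  induction p with
  | nil => intro d; simp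
  | cons e' t ih =>
    intro d
    simp only [List.foldl_cons, ih (pvStepEdgeA i d e'), pvStepEdgeA_getD]
    by_cases he : e' = e
    · subst he
      by_cases hi : i ∈ d.getD e' []
      · simp [hi]
      · simp [hi]
    · have he2 : ¬ e = e' := fun h => he h.symm
      simp [he, he2]

-- keys after A's inner loop = B's inner ordered-dedup fold
theorem pvInnerA_keys (i : Int) : ∀ (p : List Int) (d : PySem.Dict Int (List Int)),
    (p.foldl (pvStepEdgeA i) d).keys =
      p.foldl (fun ord e => if ord.contains e then ord else ord ++ [e]) d.keys := by
  intro p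
  induction p with
  | nil => intro d; rfl
  | cons e t ih =>
    intro d
    simp only [List.foldl_cons, ih (pvStepEdgeA i d e), pvStepEdgeA_keys]

-- B's ordered-dedup fold preserves Nodup
theorem pvOrdFold_nodup : ∀ (p : List Int) (ord : List Int), ord.Nodup →
    (p.foldl (fun ord e => if ord.contains e then ord else ord ++ [e]) ord).Nodup := by
  intro p
  induction p with
  | nil => intro ord h; simpa using h
  | cons e t ih =>
    intro ord h
    simp only [List.foldl_cons]
    by_cases hc : e ∈ ord
    · simpa [hc] using ih _ h
    · have hstep : (if ord.contains e = true then ord else ord ++ [e]) = ord ++ [e] := by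
        simp [hc]
      rw [hstep]
      apply ih
      rw [List.nodup_append]
      refine ⟨h, List.nodup_singleton e, ?_⟩
      intro a ha b hb
      simp only [List.mem_singleton] at hb
      subst hb
      exact fun hae => hc (hae ▸ ha)

-- keys after A's whole outer loop, as a fold over the index list
theorem pvOuterA_keys (paths : List (List Int)) : ∀ (I : List Int) (d : PySem.Dict Int (List Int)),
    (I.foldl (fun d i => (PySem.List.pyGetD paths i ([] : List Int)).foldl (pvStepEdgeA i) d) d).keys =
      I.foldl (fun ord i => (PySem.List.pyGetD paths i ([] : List Int)).foldl
        (fun ord e => if ord.contains e then ord else ord ++ [e]) ord) d.keys := by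
  intro I
  induction I with
  | nil => intro d; rfl
  | cons i t ih =>
    intro d
    simp only [List.foldl_cons, ih, pvInnerA_keys]

-- value at key e after A's whole outer loop over a Nodup list of fresh indices
theorem pvOuterA_getD (paths : List (List Int)) (e : Int) :
    ∀ (I : List Int) (d : PySem.Dict Int (List Int)), I.Nodup →
    (∀ i ∈ I, i ∉ d.getD e []) →
    ((I.foldl (fun d i => (PySem.List.pyGetD paths i ([] : List Int)).foldl (pvStepEdgeA i) d) d).getD e []) =
      d.getD e [] ++ I.filter (fun i => (PySem.List.pyGetD paths i ([] : List Int)).contains e) := by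
  intro I
  induction I with
  | nil => intro d _ _; simp
  | cons i t ih =>
    intro d hnd hfresh
    have hi : i ∉ d.getD e [] := hfresh i (by simp)
    have hd2 : ((PySem.List.pyGetD paths i ([] : List Int)).foldl (pvStepEdgeA i) d).getD e [] =
        if e ∈ PySem.List.pyGetD paths i ([] : List Int) then d.getD e [] ++ [i]
        else d.getD e [] := by
      rw [pvInnerA_getD]
      by_cases hc : e ∈ PySem.List.pyGetD paths i ([] : List Int) <;> simp [hc, hi]
    have hfresh2 : ∀ j ∈ t, j ∉ ((PySem.List.pyGetD paths i ([] : List Int)).foldl (pvStepEdgeA i) d).getD e [] := by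
      intro j hj
      rw [hd2]
      have hji : j ≠ i := by
        rintro rfl; exact (List.nodup_cons.mp hnd).1 hj
      have hjd : j ∉ d.getD e [] := hfresh j (by simp [hj])
      by_cases hc : e ∈ PySem.List.pyGetD paths i ([] : List Int)
      · simp [hc, hjd, hji]
      · simp [hc, hjd]
    simp only [List.foldl_cons]
    rw [ih _ (List.Nodup.of_cons hnd) hfresh2, hd2, List.filter_cons]
    by_cases hc : e ∈ PySem.List.pyGetD paths i ([] : List Int) <;>
      simp [hc, List.append_assoc]

-- B's (seen-set, order-list) pair fold: both components stay equal to the plain ordered-dedup fold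
theorem pvPairFold_eq : ∀ (p : List Int) (o : List Int),
    p.foldl (fun (so : PySem.Set Int × List Int) e =>
        if so.1.contains e then so else (so.1.add e, so.2 ++ [e])) (o, o)
      = (p.foldl (fun ord e => if ord.contains e then ord else ord ++ [e]) o,
         p.foldl (fun ord e => if ord.contains e then ord else ord ++ [e]) o) := by
  intro p
  induction p with
  | nil => intro o; rfl
  | cons e t ih =>
    intro o
    simp only [List.foldl_cons]
    by_cases hm : e ∈ o
    · have h1 : (if PySem.Set.contains o e = true then ((o : PySem.Set Int), o)
          else (PySem.Set.add o e, o ++ [e])) = (o, o) := by simp [hm]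
      have h2 : (if o.contains e then o else o ++ [e]) = o := by simp [hm]
      rw [h1, h2, ih]
    · have h1 : (if PySem.Set.contains o e = true then ((o : PySem.Set Int), o)
          else (PySem.Set.add o e, o ++ [e])) = ((o ++ [e] : List Int), o ++ [e]) := by
        simp [PySem.Set.add, hm]
      have h2 : (if o.contains e then o else o ++ [e]) = o ++ [e] := by simp [hm]
      rw [h1, h2, ih]

theorem pvPairFoldOuter : ∀ (ps : List (List Int)) (o : List Int),
    ps.foldl (fun (so : PySem.Set Int × List Int) p =>
        p.foldl (fun so e => if so.1.contains e then so else (so.1.add e, so.2 ++ [e])) so) (o, o)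
      = (ps.foldl (fun ord p => p.foldl (fun ord e => if ord.contains e then ord else ord ++ [e]) ord) o,
         ps.foldl (fun ord p => p.foldl (fun ord e => if ord.contains e then ord else ord ++ [e]) ord) o) := by
  intro ps
  induction ps with
  | nil => intro o; rfl
  | cons p t ih =>
    intro o
    simp only [List.foldl_cons]
    rw [pvPairFold_eq, ih]

-- B's per-path sets look up exactly like list membership on the original paths
theorem pvPredB_eq (paths : List (List Int)) (e : Int) (i : Int) :
    (PySem.List.pyGetD (paths.map (fun p => PySem.Set.ofList p)) i (PySem.Set.empty : PySem.Set Int)).contains e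
      = (PySem.List.pyGetD paths i ([] : List Int)).contains e := by
  have h0 : (PySem.Set.empty : PySem.Set Int) = PySem.Set.ofList [] := rfl
  rw [h0, PySem.List.pyGetD_map (f := fun p => PySem.Set.ofList p) (xs := paths) (i := i) (d := [])]
  simp [PySem.Set.contains, PySem.Set.mem_ofList]

-- ===== VERDICT (by name: the statement is the Claim_ definition above) =====
theorem getPlbyPathIndex_spec : Claim_equal_getPlbyPathIndex := by
  intro paths _
  show getPlbyPathIndex paths = getPlbyPathIndex_alt paths
  unfold getPlbyPathIndex
  set D := ((PySem.List.pyRange 0 (paths.length : Int) 1).foldl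
    (fun d i => (PySem.List.pyGetD paths i ([] : List Int)).foldl (pvStepEdgeA i) d)
    PySem.Dict.empty) with hD
  have hkeys : D.keys = paths.foldl
      (fun ord p => p.foldl (fun ord e => if ord.contains e then ord else ord ++ [e]) ord)
      ([] : List Int) := by
    rw [hD, pvOuterA_keys, PySem.Dict.keys_empty]
    exact PySem.List.foldl_pyRange_zero_pyGetD' paths ([] : List Int)
      (fun ord p => p.foldl (fun ord e => if ord.contains e then ord else ord ++ [e]) ord) []
  have hnodup : D.keys.Nodup := by
    rw [hkeys]
    have hgen : ∀ (ps : List (List Int)) (ord : List Int), ord.Nodup →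
        (ps.foldl (fun ord p => p.foldl (fun ord e => if ord.contains e then ord else ord ++ [e]) ord) ord).Nodup := by
      intro ps
      induction ps with
      | nil => intro ord h; simpa using h
      | cons p t ih => intro ord h; exact ih _ (pvOrdFold_nodup p ord h)
    exact hgen paths [] (by simp)
  have hval : ∀ e : Int, D.getD e [] =
      (PySem.List.pyRange 0 (paths.length : Int) 1).filter
        (fun i => (PySem.List.pyGetD paths i ([] : List Int)).contains e) := by
    intro e
    rw [hD, pvOuterA_getD paths e _ _ (PySem.List.nodup_pyRange_one 0 (paths.length : Int))
      (by intro j _; simp [PySem.Dict.getD_empty])]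
    simp [PySem.Dict.getD_empty]
  have hitems : D.items = D.keys.map (fun e => (e, D.getD e [])) :=
    PySem.Dict.items_eq_map_keys D hnodup ([] : List Int)
  have halt : getPlbyPathIndex_alt paths =
      (paths.foldl (fun ord p => p.foldl (fun ord e => if ord.contains e then ord else ord ++ [e]) ord)
        ([] : List Int)).map
        (fun e => (e, (PySem.List.pyRange 0 (paths.length : Int) 1).filter
          (fun i => (PySem.List.pyGetD paths i ([] : List Int)).contains e))) := by
    show ((paths.foldl
        (fun (so : PySem.Set Int × List Int) p =>
          p.foldl (fun so e => if so.1.contains e then so else (so.1.add e, so.2 ++ [e])) so)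
        (([] : List Int), ([] : List Int))).2).map
      (fun e => (e, (PySem.List.pyRange 0 (paths.length : Int) 1).filter
        (fun i => (PySem.List.pyGetD (paths.map (fun p => PySem.Set.ofList p)) i
          (PySem.Set.empty : PySem.Set Int)).contains e))) = _
    rw [pvPairFoldOuter]
    refine List.map_congr_left (fun e _ => ?_)
    refine congrArg (fun l => (e, l)) ?_
    exact List.filter_congr (fun i _ => pvPredB_eq paths e i)
  rw [hitems, hkeys, halt]
  exact List.map_congr_left (fun e _ => by rw [hval e])
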